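-- pv_equiv track=rewrite | github.com/riverallzero/jbnu | algorithm/BS-예산(2512).py | calCap
-- ===== SOURCE A (Python) =====
-- def calCap(datas, budget):
--     if sum(datas) <= budget:
--         return max(datas)
--     else:
--         datas.sort()
--
--         low_money, high_money = min(datas[0], budget // len(datas)), datas[-1]
--
--         while low_money <= high_money:
--             std_money = (low_money + high_money) // 2
--
--             sum_money = 0
--             for data in datas:
--                 sum_money += min(std_money, data)
--
--             if sum_money <= budget:
--                 low_money = std_money + 1
--             else:
--                 high_money = std_money - 1
--
--         return high_money
-- ===== SOURCE B (Python) =====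
-- def calCap(datas, budget):
--     if sum(datas) <= budget:
--         return max(datas)
--     datas.sort()
--     n = len(datas)
--     pref = 0
--     for i, d in enumerate(datas):
--         cap = (budget - pref) // (n - i)
--         if cap < d:
--             return cap
--         pref += d
-- ===== Notes on version B (the rewrite author's own statement) =====
-- stated objective: alternative
-- what changed: Replaced A's binary search over the money range (each step re-summing min(cap,d) over the whole list) with a single pass over the sorted list carrying a prefix sum, computing the cap by one floor division per position.
import Mathlib
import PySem

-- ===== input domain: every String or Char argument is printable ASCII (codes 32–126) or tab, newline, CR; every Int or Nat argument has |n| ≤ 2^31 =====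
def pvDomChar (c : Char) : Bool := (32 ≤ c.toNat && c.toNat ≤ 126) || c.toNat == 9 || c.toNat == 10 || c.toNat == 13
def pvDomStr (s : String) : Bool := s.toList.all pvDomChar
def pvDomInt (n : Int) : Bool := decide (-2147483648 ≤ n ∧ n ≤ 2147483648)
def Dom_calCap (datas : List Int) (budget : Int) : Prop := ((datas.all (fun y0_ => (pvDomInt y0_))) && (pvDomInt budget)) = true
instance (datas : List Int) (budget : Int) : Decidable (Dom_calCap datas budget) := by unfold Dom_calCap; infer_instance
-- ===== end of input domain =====

-- B replaces A's binary search over the money range by one pass over the sorted list with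
-- a running prefix sum, computing the cap with one floor division per position
-- (objective: alternative algorithm, same result).
-- Both A and B sort `datas` in place (the same observable mutation); the equivalence
-- proved here is about the return value.

-- ===== PORT A =====
def calCapLoop (datas : List Int) (budget : Int) (lo hi : Int) : Int :=
  if lo ≤ hi then
    let std := PySem.Int.floordiv (lo + hi) 2
    let s := datas.foldl (fun acc d => acc + min std d) 0
    if s ≤ budget then calCapLoop datas budget (std + 1) hi
    else calCapLoop datas budget lo (std - 1)
  else hi
termination_by (hi + 1 - lo).toNat
decreasing_by
  · have := PySem.Int.floordiv_two_mid_bounds (by assumption : lo ≤ hi); omega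
  · have := PySem.Int.floordiv_two_mid_bounds (by assumption : lo ≤ hi); omega

def calCap (datas : List Int) (budget : Int) : Int :=
  if datas.sum ≤ budget then (PySem.List.max? datas (fun x => x)).getD 0
  else
    let s := PySem.List.sorted datas (fun x => x) false
    let lo := min (PySem.List.pyGetD s 0 0) (PySem.Int.floordiv budget (s.length : Int))
    let hi := PySem.List.pyGetD s (-1) 0
    calCapLoop s budget lo hi

-- ===== PORT B =====
def calCapAltGo (budget : Int) (pref : Int) (rest : List Int) : Int :=
  match rest with
  | [] => 0   -- unreachable under Pre_ (the loop always returns before the list is exhausted)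
  | d :: t =>
    let cap := PySem.Int.floordiv (budget - pref) ((t.length : Int) + 1)
    if cap < d then cap else calCapAltGo budget (pref + d) t

def calCap_alt (datas : List Int) (budget : Int) : Int :=
  if datas.sum ≤ budget then (PySem.List.max? datas (fun x => x)).getD 0
  else calCapAltGo budget 0 (PySem.List.sorted datas (fun x => x) false)

-- ===== PRECONDITION & SPEC =====
-- Pre_ excludes only the empty list, on which A raises (ValueError from max([]) if
-- 0 <= budget, otherwise ZeroDivisionError) and B returns no value either.
def Pre_calCap (datas : List Int) (budget : Int) : Prop := datas ≠ []
instance (datas : List Int) (budget : Int) : Decidable (Pre_calCap datas budget) := by unfold Pre_calCap; infer_instance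
def pvWitness_calCap : List Int × Int := ([1, 3, 2], 4)

def Spec_calCap (datas : List Int) (budget : Int) (out : Int) : Prop := out = calCap_alt datas budget
instance (datas : List Int) (budget : Int) (out : Int) : Decidable (Spec_calCap datas budget out) := by unfold Spec_calCap; infer_instance

-- ===== CLAIM (what is proved, stated in full; the proofs are below) =====
def Claim_equal_calCap : Prop := ∀ (datas : List Int) (budget : Int), Dom_calCap datas budget → Pre_calCap datas budget → Spec_calCap datas budget (calCap datas budget)

-- ===== LEMMAS AND PROOFS =====

-- capSum l c = Σ_{d ∈ l} min c d  (the total spent when every item is capped at c)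
def capSum (l : List Int) (c : Int) : Int := (l.map (fun d => min c d)).sum

theorem capSum_cons (d : Int) (t : List Int) (c : Int) :
    capSum (d :: t) c = min c d + capSum t c := by simp [capSum]

theorem foldl_min_eq (l : List Int) (c a : Int) :
    l.foldl (fun acc d => acc + min c d) a = a + capSum l c := by
  induction l generalizing a with
  | nil => simp [capSum]
  | cons d t ih => simp [capSum_cons, ih, add_assoc]

theorem capSum_mono {c c' : Int} (l : List Int) (h : c ≤ c') : capSum l c ≤ capSum l c' := by
  induction l with
  | nil => simp [capSum]
  | cons d t ih =>
    rw [capSum_cons, capSum_cons]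
    exact add_le_add (min_le_min_right d h) ih

theorem capSum_le (l : List Int) (c : Int) : capSum l c ≤ (l.length : Int) * c := by
  induction l with
  | nil => simp [capSum]
  | cons d t ih =>
    rw [capSum_cons]
    calc min c d + capSum t c ≤ c + (t.length : Int) * c := add_le_add (min_le_left _ _) ih
    _ = ((d :: t).length : Int) * c := by push_cast [List.length_cons]; ring

theorem capSum_of_all_le (l : List Int) (c : Int) (h : ∀ d ∈ l, d ≤ c) :
    capSum l c = l.sum := by
  induction l with
  | nil => simp [capSum]
  | cons d t ih =>
    rw [capSum_cons, List.sum_cons, min_eq_right (h d (by simp)),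
      ih (fun x hx => h x (by simp [hx]))]

theorem capSum_of_le_all (l : List Int) (c : Int) (h : ∀ d ∈ l, c ≤ d) :
    capSum l c = (l.length : Int) * c := by
  induction l with
  | nil => simp [capSum]
  | cons d t ih =>
    rw [capSum_cons, min_eq_left (h d (by simp)), ih (fun x hx => h x (by simp [hx]))]
    push_cast [List.length_cons]; ring

theorem capSum_uniq {l : List Int} {b r r' : Int}
    (h1 : capSum l r ≤ b) (h2 : b < capSum l (r + 1))
    (h3 : capSum l r' ≤ b) (h4 : b < capSum l (r' + 1)) : r = r' := by
  rcases lt_trichotomy r r' with h | h | h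
  · have := le_trans (capSum_mono (c := r + 1) (c' := r') l (by omega)) h3; omega
  · exact h
  · have := le_trans (capSum_mono (c := r' + 1) (c' := r) l (by omega)) h1; omega

-- A's binary search returns the threshold cap
theorem calCapLoop_spec (l : List Int) (b : Int) :
    ∀ lo hi : Int, lo - 1 ≤ hi → capSum l (lo - 1) ≤ b → b < capSum l (hi + 1) →
      capSum l (calCapLoop l b lo hi) ≤ b ∧ b < capSum l (calCapLoop l b lo hi + 1) := by
  intro lo hi
  induction lo, hi using calCapLoop.induct l b with
  | case1 lo hi hle std s hs ih =>
    intro _ hlo hhi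
    have hmid := PySem.Int.floordiv_two_mid_bounds hle
    simp only [s, std] at hs
    rw [List.foldl_attach (f := fun acc d => acc + min (PySem.Int.floordiv (lo + hi) 2) d),
      foldl_min_eq, zero_add] at hs
    have hs' : capSum l (PySem.Int.floordiv (lo + hi) 2) ≤ b := hs
    rw [calCapLoop, if_pos hle]
    simp only [foldl_min_eq, zero_add]
    rw [if_pos hs']
    exact ih (by omega) (by rw [add_sub_cancel_right]; exact hs') hhi
  | case2 lo hi hle std s hs ih =>
    intro _ hlo hhi
    have hmid := PySem.Int.floordiv_two_mid_bounds hle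
    simp only [s, std] at hs
    rw [List.foldl_attach (f := fun acc d => acc + min (PySem.Int.floordiv (lo + hi) 2) d),
      foldl_min_eq, zero_add] at hs
    have hs' : ¬ capSum l (PySem.Int.floordiv (lo + hi) 2) ≤ b := hs
    rw [calCapLoop, if_pos hle]
    simp only [foldl_min_eq, zero_add]
    rw [if_neg hs']
    exact ih (by omega) hlo (by rw [sub_add_cancel]; exact lt_of_not_ge hs')
  | case3 lo hi hle =>
    intro h1 h2 h3
    rw [calCapLoop, if_neg hle]
    have : hi = lo - 1 := by omega
    subst this
    exact ⟨h2, h3⟩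

-- B's scan returns the threshold cap
theorem calCapAltGo_spec (b : Int) :
    ∀ (rest : List Int) (pref lb : Int), rest.Pairwise (· ≤ ·) → (∀ d ∈ rest, lb ≤ d) →
      (rest.length : Int) * lb ≤ b - pref → b < pref + rest.sum →
      lb ≤ calCapAltGo b pref rest ∧
      pref + capSum rest (calCapAltGo b pref rest) ≤ b ∧
      b < pref + capSum rest (calCapAltGo b pref rest + 1) := by
  intro rest
  induction rest with
  | nil => intro pref lb _ _ h1 h2; simp at h1 h2; omega
  | cons d t ih =>
    intro pref lb hpw hlb h1 h2
    have hm : (0 : Int) < (t.length : Int) + 1 := by positivity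
    have hdt : ∀ e ∈ t, d ≤ e := fun e he => List.rel_of_pairwise_cons hpw he
    by_cases hc : PySem.Int.floordiv (b - pref) ((t.length : Int) + 1) < d
    · -- immediate return
      rw [calCapAltGo]
      simp only [if_pos hc]
      set cap := PySem.Int.floordiv (b - pref) ((t.length : Int) + 1) with hcap
      have hql : cap * ((t.length : Int) + 1) ≤ b - pref :=
        (PySem.Int.le_floordiv_iff_mul_le hm).mp (le_refl _)
      have hqr : b - pref < (cap + 1) * ((t.length : Int) + 1) :=
        (PySem.Int.floordiv_lt_iff_lt_mul hm).mp (by omega)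
      have h1' : ((t.length : Int) + 1) * lb ≤ b - pref := by
        simpa [List.length_cons, add_comm] using h1
      have hlb' : lb ≤ cap := (PySem.Int.le_floordiv_iff_mul_le hm).mpr
        (by rw [mul_comm]; exact h1')
      have e1 : capSum (d :: t) cap = ((d :: t).length : Int) * cap :=
        capSum_of_le_all _ _ (by
          intro e he
          rcases List.mem_cons.mp he with h | h
          · omega
          · exact le_trans (by omega) (hdt e h))
      have e2 : capSum (d :: t) (cap + 1) = ((d :: t).length : Int) * (cap + 1) :=
        capSum_of_le_all _ _ (by
          intro e he
          rcases List.mem_cons.mp he with h | h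
          · omega
          · exact le_trans (by omega) (hdt e h))
      refine ⟨hlb', ?_, ?_⟩
      · rw [e1]; push_cast [List.length_cons]
        linarith [mul_comm cap ((t.length : Int) + 1)]
      · rw [e2]; push_cast [List.length_cons]
        linarith [mul_comm (cap + 1) ((t.length : Int) + 1)]
    · -- consume d and recurse
      rw [calCapAltGo]
      simp only [if_neg hc]
      have hd : d ≤ PySem.Int.floordiv (b - pref) ((t.length : Int) + 1) := by omega
      have hdm : d * ((t.length : Int) + 1) ≤ b - pref :=
        (PySem.Int.le_floordiv_iff_mul_le hm).mp hd
      have h1' : (t.length : Int) * d ≤ b - (pref + d) := by linarith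
      have h2' : b < (pref + d) + t.sum := by
        have := h2; simp [List.sum_cons] at this ⊢; linarith
      obtain ⟨hr1, hr2, hr3⟩ := ih (pref + d) d (List.Pairwise.of_cons hpw) hdt h1' h2'
      set r := calCapAltGo b (pref + d) t with hr
      refine ⟨le_trans (hlb d (by simp)) hr1, ?_, ?_⟩
      · rw [capSum_cons, min_eq_right hr1]; linarith
      · rw [capSum_cons, min_eq_right (by omega : d ≤ r + 1)]; linarith

-- in a Pairwise (≤) list the last element is maximal
theorem pairwise_le_getLast {l : List Int} (hp : l.Pairwise (· ≤ ·)) (hne : l ≠ []) :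
    ∀ x ∈ l, x ≤ l.getLast hne := by
  induction l with
  | nil => simp at hne
  | cons d t ih =>
    intro x hx
    cases t with
    | nil => simp at hx; simp [hx]
    | cons e u =>
      rw [List.getLast_cons (by simp)]
      rcases List.mem_cons.mp hx with h | h
      · subst h
        exact le_trans (List.rel_of_pairwise_cons hp (List.getLast_mem _)) (le_refl _)
      · exact ih (List.Pairwise.of_cons hp) (by simp) x h

-- ===== VERDICT (by name: the statement is the Claim_ definition above) =====
theorem calCap_spec : Claim_equal_calCap := by
  intro datas budget _ hpre
  unfold Spec_calCap calCap calCap_alt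
  by_cases hsum : datas.sum ≤ budget
  · rw [if_pos hsum, if_pos hsum]
  · rw [if_neg hsum, if_neg hsum]
    set s := PySem.List.sorted datas (fun x => x) false with hs
    have hperm : s.Perm datas := PySem.List.sorted_perm datas (fun x => x) false
    have hsne : s ≠ [] := by
      intro h; rw [h] at hperm; exact hpre hperm.symm.eq_nil
    have hpw : s.Pairwise (· ≤ ·) := by
      simpa using PySem.List.sorted_pairwise datas (fun x => x)
    have hssum : s.sum = datas.sum := hperm.sum_eq
    obtain ⟨h0, t, hst⟩ := List.exists_cons_of_ne_nil hsne
    have hn : (0 : Int) < (s.length : Int) := by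
      rw [hst]; push_cast [List.length_cons]; omega
    have hhead : ∀ e ∈ s, h0 ≤ e := by
      intro e he
      rw [hst] at he hpw
      rcases List.mem_cons.mp he with h | h
      · omega
      · exact List.rel_of_pairwise_cons hpw h
    set lo := min (PySem.List.pyGetD s 0 0) (PySem.Int.floordiv budget (s.length : Int)) with hlo
    have hget0 : PySem.List.pyGetD s 0 0 = h0 := by rw [hst]; exact PySem.List.pyGetD_zero_cons _ _ _
    have hlast : PySem.List.pyGetD s (-1) 0 = s.getLast hsne := PySem.List.pyGetD_neg_one s 0 hsne
    have hlofd : lo ≤ PySem.Int.floordiv budget (s.length : Int) := min_le_right _ _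
    have hnlo : lo * (s.length : Int) ≤ budget := (PySem.Int.le_floordiv_iff_mul_le hn).mp hlofd
    have hlolb : ∀ e ∈ s, lo ≤ e := fun e he => le_trans (by rw [hlo, hget0]; exact min_le_left _ _) (hhead e he)
    -- A side: the binary-search preconditions
    have hA := calCapLoop_spec s budget lo (PySem.List.pyGetD s (-1) 0)
      (by
        rw [hlast]
        have := hlolb (s.getLast hsne) (List.getLast_mem hsne)
        omega)
      (by
        have h1 : capSum s (lo - 1) ≤ (s.length : Int) * (lo - 1) := capSum_le s (lo - 1)
        have : (s.length : Int) * (lo - 1) = lo * (s.length : Int) - (s.length : Int) := by ring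
        omega)
      (by
        rw [hlast, capSum_of_all_le s _ (fun d hd => by
          have := pairwise_le_getLast hpw hsne d hd; omega)]
        omega)
    -- B side: the scan preconditions
    have hB := calCapAltGo_spec budget s 0 lo hpw hlolb
      (by rw [mul_comm, sub_zero]; exact hnlo)
      (by rw [zero_add, hssum]; exact not_le.mp hsum)
    simp only [zero_add] at hB
    exact capSum_uniq hA.1 hA.2 hB.2.1 hB.2.2
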